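-- pv_equiv track=rewrite | github.com/robmcelhinney/emperor-age | python/fetch_emperor_thumbs.py | pick_best_qid
-- ===== SOURCE A (Python) =====
-- def pick_best_qid(results):
--     for item in results:
--         desc = (item.get("description") or "").lower()
--         if "roman emperor" in desc:
--             return item.get("id")
--     for item in results:
--         desc = (item.get("description") or "").lower()
--         if "emperor" in desc and "roman" in desc:
--             return item.get("id")
--     return results[0].get("id") if results else None
-- ===== SOURCE B (Python) =====
-- def pick_best_qid(results):
--     candidate = None
--     have_candidate = False
--     for item in results:
--         desc = (item.get("description") or "").lower()
--         if "roman emperor" in desc: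
--             return item.get("id")
--         if not have_candidate and "emperor" in desc and "roman" in desc:
--             candidate = item.get("id")
--             have_candidate = True
--     if have_candidate:
--         return candidate
--     return results[0].get("id") if results else None
-- ===== Notes on version B (the rewrite author's own statement) =====
-- stated objective: alternative
-- what changed: Replaces A's two sequential scans (plus separate fallback indexing) with a single pass that returns immediately on 'roman emperor' and stashes the first both-words id as a fallback candidate.
import Mathlib
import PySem

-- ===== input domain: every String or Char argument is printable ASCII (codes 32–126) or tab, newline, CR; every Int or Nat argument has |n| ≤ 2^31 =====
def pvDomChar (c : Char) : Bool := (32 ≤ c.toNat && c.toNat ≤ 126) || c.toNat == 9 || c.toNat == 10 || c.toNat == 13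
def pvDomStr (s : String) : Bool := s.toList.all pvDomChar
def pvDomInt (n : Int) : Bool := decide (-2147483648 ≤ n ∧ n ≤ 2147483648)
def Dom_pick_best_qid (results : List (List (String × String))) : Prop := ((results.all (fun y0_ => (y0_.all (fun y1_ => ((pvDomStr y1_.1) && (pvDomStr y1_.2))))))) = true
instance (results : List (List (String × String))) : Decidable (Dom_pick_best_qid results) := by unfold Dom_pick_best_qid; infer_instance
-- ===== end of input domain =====

-- B replaces A's two sequential scans with a single pass keeping one stashed fallback candidate (return value only).
-- ===== PORT A =====
def pickLoop1 : List (List (String × String)) → Option (Option String)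
  | [] => none
  | item :: rest =>
    let desc := PySem.Str.lower ((item.lookup "description").getD "")
    if PySem.Str.isIn "roman emperor" desc then some (item.lookup "id") else pickLoop1 rest

def pickLoop2 : List (List (String × String)) → Option (Option String)
  | [] => none
  | item :: rest =>
    let desc := PySem.Str.lower ((item.lookup "description").getD "")
    if PySem.Str.isIn "emperor" desc && PySem.Str.isIn "roman" desc then
      some (item.lookup "id")
    else pickLoop2 rest

def pick_best_qid (results : List (List (String × String))) : Option String :=
  match pickLoop1 results with
  | some r => r
  | none =>
    match pickLoop2 results with
    | some r => r
    | none => match results with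
      | [] => none
      | first :: _ => first.lookup "id"

-- ===== PORT B =====
-- single loop; cand = the stashed candidate (none = not yet stored), fb = the final fallback
def pickAltGo (fb : Option String) :
    List (List (String × String)) → Option (Option String) → Option String
  | [], cand => match cand with
    | some v => v
    | none => fb
  | item :: rest, cand =>
    let desc := PySem.Str.lower ((item.lookup "description").getD "")
    if PySem.Str.isIn "roman emperor" desc then item.lookup "id"
    else
      pickAltGo fb rest
        (if cand.isNone && (PySem.Str.isIn "emperor" desc && PySem.Str.isIn "roman" desc)
         then some (item.lookup "id") else cand)

def pick_best_qid_alt (results : List (List (String × String))) : Option String :=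
  pickAltGo (match results with | [] => none | first :: _ => first.lookup "id") results none

-- ===== PRECONDITION & SPEC =====
def Spec_pick_best_qid (results : List (List (String × String))) (out : Option String) : Prop := out = pick_best_qid_alt results
instance (results : List (List (String × String))) (out : Option String) : Decidable (Spec_pick_best_qid results out) := by unfold Spec_pick_best_qid; infer_instance

-- ===== CLAIM (what is proved, stated in full; the proofs are below) =====
def Claim_equal_pick_best_qid : Prop := ∀ (results : List (List (String × String))), Dom_pick_best_qid results → Spec_pick_best_qid results (pick_best_qid results)

-- ===== LEMMAS AND PROOFS =====
-- The single pass equals: first scan-1 hit, else the stashed candidate, else first scan-2 hit, else fb.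
theorem pickAltGo_eq (fb : Option String) :
    ∀ (L : List (List (String × String))) (cand : Option (Option String)),
    pickAltGo fb L cand =
      match pickLoop1 L with
      | some r => r
      | none => match cand with
        | some v => v
        | none => match pickLoop2 L with
          | some r => r
          | none => fb := by
  intro L
  induction L with
  | nil => intro cand; cases cand <;> simp [pickAltGo, pickLoop1, pickLoop2]
  | cons item rest ih =>
    intro cand
    simp only [pickAltGo, pickLoop1, pickLoop2]
    generalize (PySem.Str.isIn "roman emperor"
        (PySem.Str.lower ((item.lookup "description").getD ""))) = b1
    generalize (PySem.Str.isIn "emperor" (PySem.Str.lower ((item.lookup "description").getD "")) &&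
        PySem.Str.isIn "roman" (PySem.Str.lower ((item.lookup "description").getD ""))) = b2
    cases b1 with
    | true => simp
    | false =>
      simp only [Bool.false_eq_true, if_false, ih]
      cases cand with
      | some v => simp
      | none => cases b2 <;> simp

-- ===== VERDICT (by name: the statement is the Claim_ definition above) =====
theorem pick_best_qid_spec : Claim_equal_pick_best_qid := by
  intro results _
  unfold Spec_pick_best_qid pick_best_qid pick_best_qid_alt
  rw [pickAltGo_eq]
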